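-- pv_equiv track=rewrite | github.com/laylaemad/my_first_project | string_ops.py | f
-- ===== SOURCE A (Python) =====
-- def f(s):
--     x=2
--     t=s[:2]
--     k=s.count(t)
--     while len(t)*k != len(s):
--         x=x+1
--         t=s[:x]
--         k=s.count(t)
--     return (t,k)
-- ===== SOURCE B (Python) =====
-- def f(s):
--     # Enumerate repetition counts k downward (largest k = shortest prefix) and
--     # verify tiling directly; no substring counting.
--     n = len(s)
--     if n >= 2:
--         for k in range(n // 2, 0, -1):
--             if n % k == 0 and s[:n // k] * k == s:
--                 return (s[:n // k], k)
--     return (s, 1)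
-- ===== Notes on version B (the rewrite author's own statement) =====
-- stated objective: faster
-- what changed: A scans prefix lengths upward calling s.count on each prefix; B enumerates repetition counts downward, filters by divisibility in O(1) and verifies a candidate with a single direct tiling comparison, so only divisors of len(s) incur a string comparison.
import Mathlib
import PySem

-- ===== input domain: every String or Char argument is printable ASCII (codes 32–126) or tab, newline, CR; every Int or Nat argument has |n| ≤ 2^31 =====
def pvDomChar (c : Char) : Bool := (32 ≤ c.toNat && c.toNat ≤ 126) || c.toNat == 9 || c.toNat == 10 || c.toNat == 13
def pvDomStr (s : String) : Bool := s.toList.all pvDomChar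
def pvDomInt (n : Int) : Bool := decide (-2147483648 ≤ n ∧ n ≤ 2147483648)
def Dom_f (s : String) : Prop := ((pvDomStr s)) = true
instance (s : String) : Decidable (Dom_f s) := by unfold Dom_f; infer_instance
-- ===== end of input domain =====

-- B replaces A's incremental prefix scan (one s.count per length) by a descending enumeration of
-- repetition counts filtered by divisibility with one direct tiling comparison each; measured faster.

-- ===== PORT A =====
-- helper lemmas cited by fLoopA's decreasing_by (the loop leaves once x reaches len(s)):
theorem pvGoNil (sub : List Char) (fuel : Nat) (acc : Nat) :
    PySem.Chars.count.go sub fuel [] acc = acc := by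
  cases fuel <;> simp [PySem.Chars.count.go]

theorem pvCountSelf (l : List Char) : PySem.Chars.count l l = 1 := by
  cases l with
  | nil => rfl
  | cons c r =>
      simp [PySem.Chars.count, PySem.Chars.count.go, List.isPrefixOf_iff_prefix, pvGoNil]

theorem pvGuardHi (s : String) (x : Nat) (hx : s.toList.length ≤ x) :
    PySem.Str.len (PySem.Str.slice s none (some (x : Int))) *
      ((PySem.Str.count s (PySem.Str.slice s none (some (x : Int)))) : Int) =
      PySem.Str.len s := by
  have ht : (PySem.Str.slice s none (some (x : Int))).toList = s.toList := by
    simp [PySem.Str.toList_slice, PySem.Chars.slice_eq_listSlice,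
      PySem.List.slice_to _ (by positivity : (0:Int) ≤ (x:Int)),
      List.take_of_length_le (by simpa using hx)]
  simp [PySem.Str.len_eq, PySem.Str.count_eq, ht, pvCountSelf]

-- the while-loop of A: t = s[:x]; k = s.count(t); while len(t)*k != len(s): x += 1; recompute
def fLoopA (s : String) (x : Nat) : String × Int :=
  let t := PySem.Str.slice s none (some (x : Int))
  let k := PySem.Str.count s t
  if h : PySem.Str.len t * (k : Int) ≠ PySem.Str.len s then
    fLoopA s (x + 1)
  else
    (t, (k : Int))
termination_by s.toList.length + 1 - x
decreasing_by
  have hxn : x < s.toList.length := by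
    by_contra hc
    exact h (pvGuardHi s x (by omega))
  omega

def f (s : String) : String × Int := fLoopA s 2

-- ===== PORT B =====
-- the for-loop of B: for k in range(n // 2, 0, -1): if n % k == 0 and s[:n//k] * k == s: return …
-- (string equality s[:n//k]*k == s is compared on the character lists, which is Python-exact)
def fLoopB (s : String) (k : Nat) : String × Int :=
  match k with
  | 0 => (s, 1)
  | Nat.succ k' =>
      let n := s.toList.length
      let kk := k' + 1
      if n % kk = 0 ∧
          (List.replicate kk (PySem.Str.slice s none (some ((n / kk : Nat) : Int))).toList).flatten
            = s.toList then
        (PySem.Str.slice s none (some ((n / kk : Nat) : Int)), (kk : Int))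
      else
        fLoopB s k'

def f_alt (s : String) : String × Int :=
  if 2 ≤ s.toList.length then fLoopB s (s.toList.length / 2) else (s, 1)

-- ===== PRECONDITION & SPEC =====
def Spec_f (s : String) (out : String × Int) : Prop := out = f_alt s
instance (s : String) (out : String × Int) : Decidable (Spec_f s out) := by unfold Spec_f; infer_instance

-- ===== CLAIM (what is proved, stated in full; the proofs are below) =====
def Claim_equal_f : Prop := ∀ (s : String), Dom_f s → Spec_f s (f s)

-- ===== LEMMAS AND PROOFS =====

-- greedy non-overlapping substring counter (the semantics of str.count), structural on the text
def pvCnt (c : Char) (t : List Char) (l : List Char) : Nat :=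
  if h : (c :: t).isPrefixOf l then
    pvCnt c t (l.drop (t.length + 1)) + 1
  else
    match l with
    | [] => 0
    | _ :: r => pvCnt c t r
termination_by l.length
decreasing_by
  · cases l with
    | nil => simp [List.isPrefixOf] at h
    | cons a r => simp
  · simp

theorem pvCntNil (c : Char) (t : List Char) : pvCnt c t [] = 0 := by
  rw [pvCnt]; simp [List.isPrefixOf]

theorem pvGoEq (c : Char) (t : List Char) :
    ∀ (fuel : Nat) (l : List Char) (acc : Nat), l.length ≤ fuel →
      PySem.Chars.count.go (c :: t) fuel l acc = acc + pvCnt c t l := by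
  intro fuel
  induction fuel with
  | zero =>
      intro l acc h
      have : l = [] := by
        cases l with
        | nil => rfl
        | cons a r => simp at h
      subst this
      simp [PySem.Chars.count.go, pvCntNil]
  | succ m ih =>
      intro l acc h
      cases l with
      | nil => simp [PySem.Chars.count.go, pvCntNil]
      | cons a r =>
          rw [pvCnt]
          by_cases hp : (c :: t).isPrefixOf (a :: r)
          · simp only [PySem.Chars.count.go, hp, if_true]
            rw [ih _ (acc + 1) (by simp [List.length_drop] at *; omega)]
            simp; omega
          · simp only [PySem.Chars.count.go, hp]
            rw [ih r acc (by simp at h; omega)]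
            simp

theorem pvCountEqCnt (c : Char) (t : List Char) (l : List Char) :
    PySem.Chars.count l (c :: t) = pvCnt c t l := by
  have h := pvGoEq c t l.length l 0 le_rfl
  simp [PySem.Chars.count, h]

theorem pvCntMulLe (c : Char) (t : List Char) (l : List Char) :
    pvCnt c t l * (t.length + 1) ≤ l.length := by
  fun_induction pvCnt with
  | case1 l h ih =>
      have hlen : t.length + 1 ≤ l.length := by
        have := (List.isPrefixOf_iff_prefix.mp h).length_le
        simpa using this
      simp [List.length_drop] at ih
      rw [Nat.add_mul]
      omega
  | case2 h => simp
  | case3 a r h ih => simp at ih ⊢; omega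

theorem pvCntRepl (c : Char) (t : List Char) (m : Nat) :
    pvCnt c t ((List.replicate m (c :: t)).flatten) = m := by
  induction m with
  | zero => simp [pvCntNil]
  | succ m ih =>
      rw [List.replicate_succ, List.flatten_cons, pvCnt]
      have hp : (c :: t).isPrefixOf ((c :: t) ++ (List.replicate m (c :: t)).flatten) := by
        simp [List.isPrefixOf_iff_prefix]
      have hd : ((c :: t) ++ (List.replicate m (c :: t)).flatten).drop (t.length + 1)
          = (List.replicate m (c :: t)).flatten := by
        simp
      simp only [hp, dif_pos, hd, ih]

theorem pvCntEqImp (c : Char) (t : List Char) (l : List Char)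
    (h : pvCnt c t l * (t.length + 1) = l.length) :
    ∃ m, (List.replicate m (c :: t)).flatten = l := by
  fun_induction pvCnt with
  | case1 l hp ih =>
      obtain ⟨rest, hrest⟩ := List.isPrefixOf_iff_prefix.mp hp
      have hdrop : l.drop (t.length + 1) = rest := by
        rw [← hrest]; simp
      have hlen : l.length = (t.length + 1) + rest.length := by
        rw [← hrest]; simp; omega
      rw [hdrop] at ih h
      obtain ⟨m, hm⟩ := ih (by rw [Nat.add_mul] at h; omega)
      refine ⟨m + 1, ?_⟩
      rw [List.replicate_succ, List.flatten_cons, hm, hrest]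
  | case2 hp => exact ⟨0, by simp⟩
  | case3 a r hp ih =>
      exfalso
      have hle := pvCntMulLe c t r
      simp at h
      omega

-- the common tiling predicate: s[:d] repeated n/d times rebuilds s, with d ∣ n
def pvQ (l : List Char) (d : Nat) : Prop :=
  d ∣ l.length ∧ (List.replicate (l.length / d) (l.take d)).flatten = l

-- the slice s[:x] on the list side, for a Nat bound
theorem pvSliceToList (s : String) (x : Nat) :
    (PySem.Str.slice s none (some (x : Int))).toList = s.toList.take x := by
  simp [PySem.Str.toList_slice, PySem.Chars.slice_eq_listSlice,
    PySem.List.slice_to _ (by positivity : (0:Int) ≤ (x:Int))]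

theorem pvTakeCons (s : String) (x : Nat) (hx1 : 1 ≤ x) (hxn : x ≤ s.toList.length) :
    ∃ c t', s.toList.take x = c :: t' ∧ t'.length + 1 = x := by
  cases hc : s.toList.take x with
  | nil =>
      exfalso
      have := congrArg List.length hc
      rw [List.length_take, List.length_nil] at this
      omega
  | cons c t' =>
      refine ⟨c, t', rfl, ?_⟩
      have h1 := congrArg List.length hc
      rw [List.length_take, List.length_cons] at h1
      omega

-- A's guard (as an equality) is exactly pvQ, for 1 ≤ x ≤ n
theorem pvGuardIff (s : String) (x : Nat) (hx1 : 1 ≤ x) (hxn : x ≤ s.toList.length) :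
    (PySem.Str.len (PySem.Str.slice s none (some (x : Int))) *
        ((PySem.Str.count s (PySem.Str.slice s none (some (x : Int)))) : Int) =
      PySem.Str.len s) ↔ pvQ s.toList x := by
  have ht := pvSliceToList s x
  obtain ⟨c, t', ht', hlt⟩ := pvTakeCons s x hx1 hxn
  have hcount : PySem.Str.count s (PySem.Str.slice s none (some (x : Int)))
      = pvCnt c t' s.toList := by
    rw [PySem.Str.count_eq, ht, ht', pvCountEqCnt]
  have hlen : PySem.Str.len (PySem.Str.slice s none (some (x : Int))) = (x : Int) := by
    rw [PySem.Str.len_eq, ht, List.length_take, Nat.min_eq_left hxn]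
  rw [hcount, hlen, PySem.Str.len_eq]
  constructor
  · intro h
    have hnat : pvCnt c t' s.toList * x = s.toList.length := by
      rw [mul_comm] at h
      exact_mod_cast h
    obtain ⟨m, hm⟩ := pvCntEqImp c t' s.toList (by rw [hlt]; exact hnat)
    have hmlen : m * x = s.toList.length := by
      have h2 := congrArg List.length hm
      simp at h2
      rw [hlt] at h2
      exact h2
    refine ⟨⟨m, by rw [← hmlen, Nat.mul_comm]⟩, ?_⟩
    have hdiv : s.toList.length / x = m := by
      rw [← hmlen, Nat.mul_div_cancel _ (by omega : 0 < x)]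
    rw [hdiv, ht']
    exact hm
  · rintro ⟨hdvd, htile⟩
    have hcnt : pvCnt c t' s.toList = s.toList.length / x := by
      conv_lhs => rw [← htile, ht']
      exact pvCntRepl c t' _
    rw [hcnt]
    have hmul : x * (s.toList.length / x) = s.toList.length := Nat.mul_div_cancel' hdvd
    exact_mod_cast congrArg (fun n : Nat => (n : Int)) hmul

-- the count's value when the tiling at x holds
theorem pvCountOfQ (s : String) (x : Nat) (hx1 : 1 ≤ x) (hxn : x ≤ s.toList.length)
    (hQ : pvQ s.toList x) :
    PySem.Str.count s (PySem.Str.slice s none (some (x : Int)))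
      = s.toList.length / x := by
  have ht := pvSliceToList s x
  obtain ⟨c, t', ht', hlt⟩ := pvTakeCons s x hx1 hxn
  have hcount : PySem.Str.count s (PySem.Str.slice s none (some (x : Int)))
      = pvCnt c t' s.toList := by
    rw [PySem.Str.count_eq, ht, ht', pvCountEqCnt]
  rw [hcount]
  conv_lhs => rw [← hQ.2, ht']
  exact pvCntRepl c t' _

-- A's loop: starting at any 2 ≤ x ≤ d0, with no witness in [2, d0), it stops exactly at d0
theorem pvLoopAEq (s : String) (d0 : Nat) (hdn : d0 ≤ s.toList.length)
    (hQ : pvQ s.toList d0) (hmin : ∀ y, 2 ≤ y → y < d0 → ¬ pvQ s.toList y) :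
    ∀ m x, 2 ≤ x → x ≤ d0 → d0 - x = m →
      fLoopA s x = (PySem.Str.slice s none (some (d0 : Int)),
        ((s.toList.length / d0 : Nat) : Int)) := by
  intro m
  induction m with
  | zero =>
      intro x hx2 hxd hm
      have hxe : x = d0 := by omega
      subst hxe
      rw [fLoopA]
      have hg := (pvGuardIff s x (by omega) hdn).mpr hQ
      simp only [hg, ne_eq, not_true_eq_false, dite_false]
      rw [pvCountOfQ s x (by omega) hdn hQ]
  | succ m ih =>
      intro x hx2 hxd hm
      have hxlt : x < d0 := by omega
      rw [fLoopA]
      have hg : PySem.Str.len (PySem.Str.slice s none (some (x : Int))) *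
          ((PySem.Str.count s (PySem.Str.slice s none (some (x : Int)))) : Int) ≠
            PySem.Str.len s := by
        intro h
        exact hmin x hx2 hxlt ((pvGuardIff s x (by omega) (by omega)).mp h)
      simp only [hg, ne_eq, not_false_eq_true, dite_true]
      exact ih (x + 1) (by omega) (by omega) (by omega)

-- B's loop: counting down from any n/d0 ≤ k ≤ n/2, it stops exactly at k = n/d0
theorem pvLoopBEq (s : String) (d0 : Nat) (h2 : 2 ≤ d0) (hdn : d0 ≤ s.toList.length)
    (hQ : pvQ s.toList d0) (hmin : ∀ y, 2 ≤ y → y < d0 → ¬ pvQ s.toList y) :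
    ∀ k, s.toList.length / d0 ≤ k → k ≤ s.toList.length / 2 →
      fLoopB s k = (PySem.Str.slice s none (some (d0 : Int)),
        ((s.toList.length / d0 : Nat) : Int)) := by
  intro k
  induction k with
  | zero =>
      intro h1 h2'
      exfalso
      have : 0 < s.toList.length / d0 := Nat.div_pos hdn (by omega)
      omega
  | succ k' ih =>
      intro h1 h2'
      rw [fLoopB]
      by_cases hc : s.toList.length % (k' + 1) = 0 ∧
          (List.replicate (k' + 1)
            (PySem.Str.slice s none
              (some ((s.toList.length / (k' + 1) : Nat) : Int))).toList).flatten = s.toList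
      · have hkdvd : (k' + 1) ∣ s.toList.length := Nat.dvd_of_mod_eq_zero hc.1
        have h2k : 2 * (k' + 1) ≤ s.toList.length := by
          have := (Nat.le_div_iff_mul_le (by omega : 0 < 2)).mp h2'
          omega
        have hd2 : 2 ≤ s.toList.length / (k' + 1) :=
          (Nat.le_div_iff_mul_le (by omega : 0 < k' + 1)).mpr (by omega)
        have hkk : s.toList.length / (s.toList.length / (k' + 1)) = k' + 1 :=
          Nat.div_div_self hkdvd (by omega)
        have hQd : pvQ s.toList (s.toList.length / (k' + 1)) := by
          refine ⟨Nat.div_dvd_of_dvd hkdvd, ?_⟩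
          rw [hkk]
          have h3 := hc.2
          rw [pvSliceToList] at h3
          exact h3
        have hge : d0 ≤ s.toList.length / (k' + 1) := by
          by_contra hlt
          exact hmin _ hd2 (by omega) hQd
        have hle : k' + 1 ≤ s.toList.length / d0 := by
          calc k' + 1 = s.toList.length / (s.toList.length / (k' + 1)) := hkk.symm
            _ ≤ s.toList.length / d0 := Nat.div_le_div_left hge (by omega)
        have hkeq : k' + 1 = s.toList.length / d0 := by omega
        have hdeq : s.toList.length / (k' + 1) = d0 := by
          rw [hkeq, Nat.div_div_self hQ.1 (by omega)]
        rw [if_pos hc, hdeq, hkeq]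
      · have hne : k' + 1 ≠ s.toList.length / d0 := by
          intro he
          apply hc
          rw [he]
          have hdd : s.toList.length / (s.toList.length / d0) = d0 :=
            Nat.div_div_self hQ.1 (by omega)
          refine ⟨Nat.dvd_iff_mod_eq_zero.mp (Nat.div_dvd_of_dvd hQ.1), ?_⟩
          rw [pvSliceToList, hdd]
          exact hQ.2
        simp only [hc, if_false]
        exact ih (by omega) (by omega)

-- pvQ holds at n itself (n ≥ 1)
theorem pvQFull (l : List Char) (h : 1 ≤ l.length) : pvQ l l.length := by
  refine ⟨dvd_refl _, ?_⟩
  rw [Nat.div_self (by omega)]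
  simp

-- ===== VERDICT (by name: the statement is the Claim_ definition above) =====
theorem f_spec : Claim_equal_f := by
  intro s _hDom
  show f s = f_alt s
  by_cases hn : 2 ≤ s.toList.length
  · have hex : ∃ d, 2 ≤ d ∧ pvQ s.toList d :=
      ⟨s.toList.length, hn, pvQFull s.toList (by omega)⟩
    haveI : DecidablePred fun d => 2 ≤ d ∧ pvQ s.toList d := fun d => by
      unfold pvQ; infer_instance
    obtain ⟨hd2, hQ⟩ := Nat.find_spec hex
    have hmin : ∀ y, 2 ≤ y → y < Nat.find hex → ¬ pvQ s.toList y := fun y h2y hlt hQy =>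
      Nat.find_min hex hlt ⟨h2y, hQy⟩
    have hdn : Nat.find hex ≤ s.toList.length :=
      Nat.find_min' hex ⟨hn, pvQFull s.toList (by omega)⟩
    have hA := pvLoopAEq s (Nat.find hex) hdn hQ hmin (Nat.find hex - 2) 2 le_rfl hd2 rfl
    have hB := pvLoopBEq s (Nat.find hex) hd2 hdn hQ hmin (s.toList.length / 2)
      (Nat.div_le_div_left hd2 (by omega)) le_rfl
    rw [f, f_alt, if_pos hn, hA, hB]
  · rw [f, f_alt, if_neg hn, fLoopA]
    have hg := pvGuardHi s 2 (by omega)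
    simp only [hg, ne_eq, not_true_eq_false, dite_false]
    have hs : PySem.Str.slice s none (some ((2 : Nat) : Int)) = s :=
      String.toList_inj.mp (by rw [pvSliceToList]; exact List.take_of_length_le (by omega))
    rw [hs, PySem.Str.count_eq, pvCountSelf]
    rfl
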